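-- pv_equiv track=rewrite | github.com/sombr/advent-of-code | 2024/day20/part.py | find_jumps
-- ===== SOURCE A (Python) =====
-- def find_jumps(path, dist):
--     pcost = {}
--
--     for idx, pos in enumerate(path):
--         pcost[pos] = idx
--
--     jumps = {}
--     for pos, step in pcost.items():
--         r, c = pos
--         # 1 2 3 4
--         #     # 5
--         # 9 8 7 6
--
--         for dr in range(-dist, dist+1):
--             cspan = dist - abs(dr)
--             for dc in range(-cspan, cspan+1):
--                 nr, nc = r+dr, c+dc
--
--                 path_span = abs(dr) + abs(dc)
--
--                 next_step = pcost.get( (nr,nc), 0 )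
--                 if next_step - path_span <= step:
--                     continue
--
--                 saving = (next_step - step) - path_span
--
--                 if saving > 0:
--                     jumps[ ((r,c), (nr,nc)) ] = saving
--
--     return jumps
-- ===== SOURCE B (Python) =====
-- def find_jumps(path, dist):
--     pcost = {pos: idx for idx, pos in enumerate(path)}
--
--     # index the path cells by row, each row's (col, step) pairs in increasing order
--     rows = {}
--     for (r, c), idx in pcost.items():
--         rows.setdefault(r, []).append((c, idx))
--     for r in rows:
--         rows[r] = sorted(rows[r])
--
--     jumps = {}
--     for (r, c), step in pcost.items():
--         for nr in range(r - dist, r + dist + 1):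
--             for nc, nstep in rows.get(nr, []):
--                 md = abs(nr - r) + abs(nc - c)
--                 saving = nstep - step - md
--                 if md <= dist and saving > 0:
--                     jumps[(r, c), (nr, nc)] = saving
--     return jumps
-- ===== Notes on version B (the rewrite author's own statement) =====
-- stated objective: faster
-- what changed: Instead of scanning the whole (2*dist+1)^2 diamond of (dr,dc) grid offsets around each cell, B builds a row index of the path cells once and, per source cell, visits only the path cells lying in the 2*dist+1 nearby rows.
import Mathlib
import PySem

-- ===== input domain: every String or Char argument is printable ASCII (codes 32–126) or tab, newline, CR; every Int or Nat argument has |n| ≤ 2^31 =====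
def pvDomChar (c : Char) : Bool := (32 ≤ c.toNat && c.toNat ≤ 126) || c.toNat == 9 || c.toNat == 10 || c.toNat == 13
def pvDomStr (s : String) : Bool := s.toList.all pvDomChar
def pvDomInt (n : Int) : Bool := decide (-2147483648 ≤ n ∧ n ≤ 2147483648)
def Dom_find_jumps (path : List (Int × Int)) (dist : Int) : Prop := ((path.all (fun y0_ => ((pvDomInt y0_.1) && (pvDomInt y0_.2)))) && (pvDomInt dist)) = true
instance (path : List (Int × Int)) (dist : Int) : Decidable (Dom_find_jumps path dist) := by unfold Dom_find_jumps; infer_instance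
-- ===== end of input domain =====

-- B indexes the path cells by row and, per source cell, scans only path cells in the nearby
-- rows instead of the full diamond of (dr,dc) offsets; return value proved equal.


-- ===== PORT A =====
def find_jumps (path : List (Int × Int)) (dist : Int) : List ((Int × Int) × (Int × Int) × Int) :=
  let pcost := (PySem.List.enumerate path 0).foldl
    (fun d (ip : Int × (Int × Int)) => d.insert ip.2 ip.1) PySem.Dict.empty
  let jumps := pcost.items.foldl (fun jumps (it : (Int × Int) × Int) =>
    let r := it.1.1
    let c := it.1.2
    let step := it.2
    (PySem.List.pyRange (-dist) (dist + 1) 1).foldl (fun jumps dr =>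
      let cspan := dist - |dr|
      (PySem.List.pyRange (-cspan) (cspan + 1) 1).foldl (fun jumps dc =>
        let nr := r + dr
        let nc := c + dc
        let path_span := |dr| + |dc|
        let next_step := pcost.getD (nr, nc) 0
        if next_step - path_span ≤ step then jumps
        else
          let saving := (next_step - step) - path_span
          if saving > 0 then jumps.insert ((r, c), (nr, nc)) saving else jumps) jumps) jumps)
    PySem.Dict.empty
  jumps.items.map (fun e => (e.1.1, e.1.2, e.2))

-- ===== PORT B =====
def find_jumps_alt (path : List (Int × Int)) (dist : Int) : List ((Int × Int) × (Int × Int) × Int) :=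
  let pcost := (PySem.List.enumerate path 0).foldl
    (fun d (ip : Int × (Int × Int)) => d.insert ip.2 ip.1) PySem.Dict.empty
  -- rows.setdefault(r, []).append((c, idx))  ==  modify r [] (· ++ [(c, idx)])  (exact)
  let rows := pcost.items.foldl
    (fun d (it : (Int × Int) × Int) => d.modify it.1.1 [] (· ++ [(it.1.2, it.2)]))
    (PySem.Dict.empty : PySem.Dict Int (List (Int × Int)))
  -- for r in rows: rows[r] = sorted(rows[r])   (Python sorts the (col, step) tuples lexicographically)
  let rows := rows.keys.foldl
    (fun d r => d.insert r (PySem.List.sorted (d.getD r []) (fun p => (toLex p : Int ×ₗ Int)))) rows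
  let jumps := pcost.items.foldl (fun jumps (it : (Int × Int) × Int) =>
    let r := it.1.1
    let c := it.1.2
    let step := it.2
    (PySem.List.pyRange (r - dist) (r + dist + 1) 1).foldl (fun jumps nr =>
      (rows.getD nr []).foldl (fun jumps (p : Int × Int) =>
        let nc := p.1
        let nstep := p.2
        let md := |nr - r| + |nc - c|
        let saving := nstep - step - md
        if md ≤ dist ∧ saving > 0 then jumps.insert ((r, c), (nr, nc)) saving else jumps) jumps)
      jumps) PySem.Dict.empty
  jumps.items.map (fun e => (e.1.1, e.1.2, e.2))

-- ===== PRECONDITION & SPEC =====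
def Spec_find_jumps (path : List (Int × Int)) (dist : Int) (out : List ((Int × Int) × (Int × Int) × Int)) : Prop := out = find_jumps_alt path dist
instance (path : List (Int × Int)) (dist : Int) (out : List ((Int × Int) × (Int × Int) × Int)) : Decidable (Spec_find_jumps path dist out) := by unfold Spec_find_jumps; infer_instance

-- ===== CLAIM (what is proved, stated in full; the proofs are below) =====
def Claim_equal_find_jumps : Prop := ∀ (path : List (Int × Int)) (dist : Int), Dom_find_jumps path dist → Spec_find_jumps path dist (find_jumps path dist)

-- ===== LEMMAS AND PROOFS =====

-- Manhattan distance between two cells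
def pvMd (s q : Int × Int) : Int := |q.1 - s.1| + |q.2 - s.2|

-- saving of the jump from source item `it` (cell, step) to cell q
def pvSv (pc : PySem.Dict (Int × Int) Int) (it : (Int × Int) × Int) (q : Int × Int) : Int :=
  pc.getD q 0 - it.2 - pvMd it.1 q

-- the single real emission condition
def pvW (pc : PySem.Dict (Int × Int) Int) (d : Int) (it : (Int × Int) × Int) (q : Int × Int) : Bool :=
  decide (pvMd it.1 q ≤ d ∧ pvSv pc it q > 0)

-- A's diamond of cells around s, in A's emission order
def pvDia (s : Int × Int) (d : Int) : List (Int × Int) :=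
  (PySem.List.pyRange (-d) (d + 1) 1).flatMap (fun dr =>
    (PySem.List.pyRange (-(d - |dr|)) ((d - |dr|) + 1) 1).map (fun dc => (s.1 + dr, s.2 + dc)))

-- B's per-row cell entries, with each row's (col, step) list sorted
def pvRow (pc : PySem.Dict (Int × Int) Int) (r : Int) : List (Int × Int) :=
  PySem.List.sorted
    ((pc.items.filter (fun it => it.1.1 == r)).map (fun it => (it.1.2, it.2)))
    (fun p => (toLex p : Int ×ₗ Int))

-- B's band of candidate cells around s, in B's emission order
def pvBand (pc : PySem.Dict (Int × Int) Int) (s : Int × Int) (d : Int) : List (Int × Int) :=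
  (PySem.List.pyRange (s.1 - d) (s.1 + d + 1) 1).flatMap (fun nr =>
    (pvRow pc nr).map (fun p => (nr, p.1)))

-- canonical per-source step: conditional insert over a base list of candidate cells
def pvStep (pc : PySem.Dict (Int × Int) Int) (d : Int) (base : List (Int × Int))
    (j : PySem.Dict ((Int × Int) × (Int × Int)) Int) (it : (Int × Int) × Int) :
    PySem.Dict ((Int × Int) × (Int × Int)) Int :=
  base.foldl (fun j q => if pvW pc d it q then j.insert (it.1, q) (pvSv pc it q) else j) j

def pvStepA (pc : PySem.Dict (Int × Int) Int) (d : Int)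
    (j : PySem.Dict ((Int × Int) × (Int × Int)) Int) (it : (Int × Int) × Int) :
    PySem.Dict ((Int × Int) × (Int × Int)) Int :=
  pvStep pc d (pvDia it.1 d) j it

-- the entries a source item contributes
def pvEntries (pc : PySem.Dict (Int × Int) Int) (d : Int) (it : (Int × Int) × Int) :
    List (((Int × Int) × (Int × Int)) × Int) :=
  ((pvDia it.1 d).filter (pvW pc d it)).map (fun q => ((it.1, q), pvSv pc it q))

lemma pvMd_nonneg (s q : Int × Int) : 0 ≤ pvMd s q := by
  have := abs_nonneg (q.1 - s.1); have := abs_nonneg (q.2 - s.2); unfold pvMd; omega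

lemma pvMd_shift (s : Int × Int) (dr dc : Int) :
    pvMd s (s.1 + dr, s.2 + dc) = |dr| + |dc| := by
  simp [pvMd]

lemma mem_pvDia {s : Int × Int} {d : Int} {q : Int × Int} :
    q ∈ pvDia s d ↔ pvMd s q ≤ d := by
  unfold pvDia
  simp only [List.mem_flatMap, List.mem_map, PySem.List.mem_pyRange_one]
  constructor
  · rintro ⟨dr, ⟨h1, h2⟩, dc, ⟨h3, h4⟩, rfl⟩
    rw [pvMd_shift]
    have hdr : |dr| ≤ d := abs_le.mpr ⟨h1, by omega⟩
    have hdc : |dc| ≤ d - |dr| := abs_le.mpr ⟨by omega, by omega⟩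
    omega
  · intro h
    refine ⟨q.1 - s.1, ?_, q.2 - s.2, ?_, ?_⟩
    · have h1 := le_abs_self (q.1 - s.1)
      have h2 := neg_abs_le (q.1 - s.1)
      have := pvMd_nonneg s q
      have := abs_nonneg (q.2 - s.2)
      unfold pvMd at h; omega
    · have h1 := le_abs_self (q.2 - s.2)
      have h2 := neg_abs_le (q.2 - s.2)
      unfold pvMd at h; omega
    · ext <;> simp

lemma pairwise_pvDia (s : Int × Int) (d : Int) :
    (pvDia s d).Pairwise (fun a b => (toLex a : Int ×ₗ Int) < toLex b) := by
  unfold pvDia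
  rw [List.pairwise_flatMap]
  constructor
  · intro dr _
    rw [List.pairwise_map]
    refine (PySem.List.pairwise_lt_pyRange_one _ _).imp ?_
    intro a b hab
    rw [Prod.Lex.lt_iff]
    right; exact ⟨rfl, by simpa using hab⟩
  · refine (PySem.List.pairwise_lt_pyRange_one _ _).imp ?_
    intro a b hab x hx y hy
    obtain ⟨dc1, _, rfl⟩ := List.mem_map.mp hx
    obtain ⟨dc2, _, rfl⟩ := List.mem_map.mp hy
    rw [Prod.Lex.lt_iff]
    left; simpa using hab

lemma nodup_pvDia (s : Int × Int) (d : Int) : (pvDia s d).Nodup := by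
  refine (pairwise_pvDia s d).imp ?_
  intro a b hlt he
  subst he
  exact lt_irrefl _ hlt

-- membership in a row list = membership in the path-cost dict, at that row
lemma mem_pvRow {pc : PySem.Dict (Int × Int) Int} {r : Int} {p : Int × Int} :
    p ∈ pvRow pc r ↔ ((r, p.1), p.2) ∈ pc.items := by
  unfold pvRow
  rw [PySem.List.mem_sorted]
  simp only [List.mem_map, List.mem_filter, beq_iff_eq]
  constructor
  · rintro ⟨it, ⟨hit, hr⟩, rfl⟩
    have : it = ((r, it.1.2), it.2) := by
      ext <;> simp [hr.symm]
    rwa [← this]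
  · intro h
    exact ⟨((r, p.1), p.2), ⟨h, rfl⟩, rfl⟩

-- within a row list the columns are strictly increasing
lemma pairwise_fst_pvRow (pc : PySem.Dict (Int × Int) Int) (hk : pc.keys.Nodup) (r : Int) :
    (pvRow pc r).Pairwise (fun p q => p.1 < q.1) := by
  have hpk : pc.items.Pairwise (fun a b => a.1 ≠ b.1) := by
    have := hk
    simp only [PySem.Dict.keys] at this
    exact (List.pairwise_map.mp this)
  have hfilter : (pc.items.filter (fun it => it.1.1 == r)).Pairwise
      (fun a b => a.1 ≠ b.1) := hpk.sublist List.filter_sublist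
  have hne : ((pc.items.filter (fun it => it.1.1 == r)).map
      (fun it => (it.1.2, it.2))).Pairwise (fun p q => p.1 ≠ q.1) := by
    rw [List.pairwise_map]
    refine List.Pairwise.imp_of_mem ?_ hfilter
    intro a b ha hb hab
    have har : a.1.1 = r := by simpa using (List.mem_filter.mp ha).2
    have hbr : b.1.1 = r := by simpa using (List.mem_filter.mp hb).2
    intro hc
    apply hab
    ext
    · rw [har, hbr]
    · exact hc
  have hperm := PySem.List.sorted_perm
      ((pc.items.filter (fun it => it.1.1 == r)).map (fun it => (it.1.2, it.2)))
      (fun p => (toLex p : Int ×ₗ Int)) false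
  have hne' : ((pvRow pc r).map (·.1)).Nodup := by
    refine (List.Perm.nodup_iff (hperm.map (·.1))).mpr ?_
    exact (List.pairwise_map.mpr (hne.imp (fun h => h)))
  have hne'' : (pvRow pc r).Pairwise (fun p q => p.1 ≠ q.1) := List.pairwise_map.mp hne'
  have hle : (pvRow pc r).Pairwise
      (fun p q => (toLex p : Int ×ₗ Int) ≤ toLex q) :=
    PySem.List.sorted_pairwise _ _
  refine (hle.and hne'').imp ?_
  rintro p q ⟨h1, h2⟩
  rcases Prod.Lex.le_iff.mp h1 with h | ⟨he, _⟩
  · exact h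
  · exact absurd he h2

lemma mem_pvBand {pc : PySem.Dict (Int × Int) Int} {s : Int × Int} {d : Int} {q : Int × Int} :
    q ∈ pvBand pc s d ↔ |q.1 - s.1| ≤ d ∧ q ∈ pc.keys := by
  unfold pvBand
  simp only [List.mem_flatMap, List.mem_map, PySem.List.mem_pyRange_one]
  constructor
  · rintro ⟨nr, ⟨h1, h2⟩, p, hp, rfl⟩
    refine ⟨by rw [abs_le]; constructor <;> simp <;> omega, ?_⟩
    have := mem_pvRow.mp hp
    simp only [PySem.Dict.keys]
    exact List.mem_map.mpr ⟨_, this, rfl⟩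
  · rintro ⟨hband, hmem⟩
    simp only [PySem.Dict.keys, List.mem_map] at hmem
    obtain ⟨itp, hitp, hq⟩ := hmem
    refine ⟨q.1, ⟨?_, ?_⟩, (q.2, itp.2), ?_, ?_⟩
    · have := abs_le.mp hband; omega
    · have := abs_le.mp hband; omega
    · refine mem_pvRow.mpr ?_
      have : itp = ((q.1, q.2), itp.2) := by rw [← hq]
      simpa using (this ▸ hitp)
    · ext <;> simp

lemma pairwise_pvBand (pc : PySem.Dict (Int × Int) Int) (hk : pc.keys.Nodup)
    (s : Int × Int) (d : Int) :
    (pvBand pc s d).Pairwise (fun a b => (toLex a : Int ×ₗ Int) < toLex b) := by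
  unfold pvBand
  rw [List.pairwise_flatMap]
  constructor
  · intro nr _
    rw [List.pairwise_map]
    refine (pairwise_fst_pvRow pc hk nr).imp ?_
    intro a b hab
    rw [Prod.Lex.lt_iff]
    right; exact ⟨rfl, hab⟩
  · refine (PySem.List.pairwise_lt_pyRange_one _ _).imp ?_
    intro a b hab x hx y hy
    obtain ⟨p1, _, rfl⟩ := List.mem_map.mp hx
    obtain ⟨p2, _, rfl⟩ := List.mem_map.mp hy
    rw [Prod.Lex.lt_iff]
    left; exact hab

lemma nodup_pvBand (pc : PySem.Dict (Int × Int) Int) (hk : pc.keys.Nodup)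
    (s : Int × Int) (d : Int) : (pvBand pc s d).Nodup := by
  refine (pairwise_pvBand pc hk s d).imp ?_
  intro a b hlt he
  subst he
  exact lt_irrefl _ hlt

-- core: A's diamond order and B's row-band order produce the same filtered cell list
lemma pvCore (pc : PySem.Dict (Int × Int) Int) (d : Int) (it : (Int × Int) × Int)
    (hk : pc.keys.Nodup) (hst : 0 ≤ it.2) :
    (pvDia it.1 d).filter (pvW pc d it) = (pvBand pc it.1 d).filter (pvW pc d it) := by
  have hmemW : ∀ q : Int × Int, pvW pc d it q = true → q ∈ pc.keys := by
    intro q hw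
    by_contra hq
    have hc : pc.contains q = false := by
      rw [PySem.Dict.contains_eq_decide_mem_keys]; simpa using hq
    have h0 : pc.getD q 0 = 0 := PySem.Dict.getD_of_not_contains pc 0 hc
    have := pvMd_nonneg it.1 q
    simp only [pvW, pvSv, h0, decide_eq_true_eq] at hw
    omega
  refine List.Perm.eq_of_pairwise (le := fun a b => (toLex a : Int ×ₗ Int) < toLex b)
    ?_ ?_ ?_ ?_
  · intro a b _ _ h1 h2; exact absurd h2 (lt_asymm h1)
  · exact List.Pairwise.sublist List.filter_sublist (pairwise_pvDia it.1 d)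
  · exact List.Pairwise.sublist List.filter_sublist (pairwise_pvBand pc hk it.1 d)
  · rw [List.perm_ext_iff_of_nodup ((nodup_pvDia it.1 d).filter _)
      ((nodup_pvBand pc hk it.1 d).filter _)]
    intro q
    simp only [List.mem_filter, mem_pvDia, mem_pvBand]
    constructor
    · rintro ⟨hmd, hw⟩
      refine ⟨⟨?_, hmemW q hw⟩, hw⟩
      have := abs_nonneg (q.2 - it.1.2)
      unfold pvMd at hmd
      omega
    · rintro ⟨_, hw⟩
      refine ⟨?_, hw⟩
      simp only [pvW, decide_eq_true_eq] at hw
      exact hw.1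

-- A's literal outer-loop body is the canonical conditional-insert step over the diamond
lemma pvBodyA (pc : PySem.Dict (Int × Int) Int) (d : Int)
    (j : PySem.Dict ((Int × Int) × (Int × Int)) Int) (it : (Int × Int) × Int) :
    (PySem.List.pyRange (-d) (d + 1) 1).foldl (fun jumps dr =>
      (PySem.List.pyRange (-(d - |dr|)) ((d - |dr|) + 1) 1).foldl (fun jumps dc =>
        let nr := it.1.1 + dr
        let nc := it.1.2 + dc
        let path_span := |dr| + |dc|
        let next_step := pc.getD (nr, nc) 0
        if next_step - path_span ≤ it.2 then jumps
        else
          let saving := (next_step - it.2) - path_span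
          if saving > 0 then jumps.insert ((it.1.1, it.1.2), (nr, nc)) saving else jumps) jumps) j
    = pvStepA pc d j it := by
  unfold pvStepA pvStep pvDia
  rw [List.foldl_flatMap]
  refine PySem.List.foldl_congr_mem _ _ _ _ ?_
  intro acc dr hdr
  rw [List.foldl_map]
  refine PySem.List.foldl_congr_mem _ _ _ _ ?_
  intro acc' dc hdc
  rw [PySem.List.mem_pyRange_one] at hdr hdc
  have hdrd : |dr| ≤ d := abs_le.mpr ⟨hdr.1, by omega⟩
  have hdcd : |dc| ≤ d - |dr| := abs_le.mpr ⟨by omega, by omega⟩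
  have hmd : pvMd it.1 (it.1.1 + dr, it.1.2 + dc) = |dr| + |dc| := by
    have := pvMd_shift it.1 dr dc
    simpa using this
  simp only [pvW, pvSv, hmd, decide_eq_true_eq]
  split_ifs <;> first | rfl | (exfalso; omega)

-- B's literal inner double loop is the canonical conditional-insert step over the band
lemma pvBodyB (pc : PySem.Dict (Int × Int) Int) (d : Int) (hk : pc.keys.Nodup)
    (rowsD : PySem.Dict Int (List (Int × Int)))
    (hrows : ∀ nr : Int, rowsD.getD nr [] = pvRow pc nr)
    (j : PySem.Dict ((Int × Int) × (Int × Int)) Int) (it : (Int × Int) × Int) :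
    (PySem.List.pyRange (it.1.1 - d) (it.1.1 + d + 1) 1).foldl (fun jumps nr =>
      (rowsD.getD nr []).foldl (fun jumps (p : Int × Int) =>
        if |nr - it.1.1| + |p.1 - it.1.2| ≤ d ∧ p.2 - it.2 - (|nr - it.1.1| + |p.1 - it.1.2|) > 0
        then jumps.insert ((it.1.1, it.1.2), (nr, p.1))
          (p.2 - it.2 - (|nr - it.1.1| + |p.1 - it.1.2|))
        else jumps) jumps) j
    = pvStep pc d (pvBand pc it.1 d) j it := by
  unfold pvStep pvBand
  rw [List.foldl_flatMap]
  refine PySem.List.foldl_congr_mem _ _ _ _ ?_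
  intro acc nr _
  rw [hrows nr, List.foldl_map]
  refine PySem.List.foldl_congr_mem _ _ _ _ ?_
  intro acc' p hp
  have hpc : pc.getD (nr, p.1) 0 = p.2 :=
    PySem.Dict.getD_of_mem_items pc (mem_pvRow.mp hp) hk 0
  simp only [pvW, pvSv, pvMd, hpc, decide_eq_true_eq]

-- the canonical step appends exactly pvEntries, for any base list with the same filtrate
lemma pvStep_items' (pc : PySem.Dict (Int × Int) Int) (d : Int) (base : List (Int × Int))
    (it : (Int × Int) × Int)
    (hbase : base.filter (pvW pc d it) = (pvDia it.1 d).filter (pvW pc d it))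
    (j : PySem.Dict ((Int × Int) × (Int × Int)) Int)
    (hfresh : ∀ p ∈ j.items, p.1.1 ≠ it.1) :
    (pvStep pc d base j it).items = j.items ++ pvEntries pc d it := by
  unfold pvStep pvEntries
  rw [← List.foldl_filter, hbase]
  rw [PySem.Dict.items_foldl_insert_fresh _ (fun q => (it.1, q)) (fun q => pvSv pc it q) j ?_ ?_]
  · intro q _
    by_contra hc
    have hmem : (it.1, q) ∈ j.keys := by
      rw [PySem.Dict.contains_eq_decide_mem_keys] at hc
      simpa using hc
    simp only [PySem.Dict.keys, List.mem_map] at hmem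
    obtain ⟨p, hp, he⟩ := hmem
    exact hfresh p hp (by rw [he])
  · refine List.Nodup.map ?_ ((nodup_pvDia it.1 d).filter _)
    intro a b h
    simpa using congrArg Prod.snd h

-- the outer loop: with per-item agreement and fresh sources, both folds coincide
lemma pvOuter (pc : PySem.Dict (Int × Int) Int) (d : Int)
    (base : ((Int × Int) × Int) → List (Int × Int))
    (hstep : ∀ (it : (Int × Int) × Int), 0 ≤ it.2 →
        (base it).filter (pvW pc d it) = (pvDia it.1 d).filter (pvW pc d it)) :
    ∀ (L : List ((Int × Int) × Int)) (j : PySem.Dict ((Int × Int) × (Int × Int)) Int),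
      (∀ it ∈ L, 0 ≤ it.2) → (L.map (·.1)).Nodup →
      (∀ p ∈ j.items, ∀ it ∈ L, p.1.1 ≠ it.1) →
      L.foldl (pvStepA pc d) j = L.foldl (fun j it => pvStep pc d (base it) j it) j := by
  intro L
  induction L with
  | nil => intro j _ _ _; rfl
  | cons it L ih =>
    intro j hv hnd hj
    have hst : 0 ≤ it.2 := hv it (List.mem_cons_self)
    have hfresh : ∀ p ∈ j.items, p.1.1 ≠ it.1 := fun p hp => hj p hp it List.mem_cons_self
    have hA : (pvStepA pc d j it).items = j.items ++ pvEntries pc d it :=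
      pvStep_items' pc d (pvDia it.1 d) it rfl j hfresh
    have hB : (pvStep pc d (base it) j it).items = j.items ++ pvEntries pc d it :=
      pvStep_items' pc d (base it) it (hstep it hst) j hfresh
    have heq : pvStepA pc d j it = pvStep pc d (base it) j it :=
      PySem.Dict.ext (by rw [hA, hB])
    simp only [List.foldl_cons, heq]
    refine ih (pvStep pc d (base it) j it) (fun x hx => hv x (List.mem_cons_of_mem _ hx))
      (by simpa using hnd.of_cons) ?_
    intro p hp it' hit'
    rw [hB] at hp
    rcases List.mem_append.mp hp with h | h
    · exact hj p h it' (List.mem_cons_of_mem _ hit')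
    · unfold pvEntries at h
      obtain ⟨q, _, rfl⟩ := List.mem_map.mp h
      intro he
      simp only at he
      have : it.1 ∈ L.map (·.1) := by
        rw [he]; exact List.mem_map.mpr ⟨it', hit', rfl⟩
      simp only [List.map_cons] at hnd
      exact (List.nodup_cons.mp hnd).1 this

-- pcost facts: keys are unique, values (enumerate indices) are nonnegative
lemma pv_pcost_nodup (path : List (Int × Int)) :
    ((PySem.List.enumerate path 0).foldl
      (fun d (ip : Int × (Int × Int)) => d.insert ip.2 ip.1) PySem.Dict.empty).keys.Nodup :=
  PySem.Dict.nodup_keys_foldl_insert_key (PySem.List.enumerate path 0)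
    (fun ip : Int × (Int × Int) => ip.2) (fun _ ip => ip.1) PySem.Dict.empty
    PySem.Dict.nodup_keys_empty

lemma pv_vals_nonneg_aux (l : List (Int × (Int × Int))) (hl : ∀ x ∈ l, 0 ≤ x.1) :
    ∀ (dd : PySem.Dict (Int × Int) Int), (∀ p ∈ dd.items, 0 ≤ p.2) →
    ∀ p ∈ (l.foldl (fun d ip => d.insert ip.2 ip.1) dd).items, 0 ≤ p.2 := by
  induction l with
  | nil => intro dd hd p hp; exact hd p hp
  | cons x l ih =>
    intro dd hd p hp
    refine ih (fun y hy => hl y (List.mem_cons_of_mem _ hy)) _ ?_ p hp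
    intro p' hp'
    rcases (PySem.Dict.mem_items_insert dd x.2 x.1 p').mp hp' with rfl | ⟨h, _⟩
    · exact hl x List.mem_cons_self
    · exact hd p' h

lemma pv_pcost_nonneg (path : List (Int × Int)) :
    ∀ p ∈ ((PySem.List.enumerate path 0).foldl
      (fun d (ip : Int × (Int × Int)) => d.insert ip.2 ip.1) PySem.Dict.empty).items, 0 ≤ p.2 := by
  refine pv_vals_nonneg_aux _ ?_ _ (by simp [PySem.Dict.empty])
  intro x hx
  rw [PySem.List.mem_enumerate_iff] at hx
  obtain ⟨k, _, rfl⟩ := hx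
  simp

-- the grouped-by-row dict before sorting: value at r is the row-r items in path order
lemma pv_rows0_getD (pc : PySem.Dict (Int × Int) Int) (r : Int) :
    (pc.items.foldl
      (fun d (it : (Int × Int) × Int) => d.modify it.1.1 [] (· ++ [(it.1.2, it.2)]))
      (PySem.Dict.empty : PySem.Dict Int (List (Int × Int)))).getD r []
    = (pc.items.filter (fun it => it.1.1 == r)).map (fun it => (it.1.2, it.2)) := by
  have h1 : pc.items.foldl
      (fun d (it : (Int × Int) × Int) => d.modify it.1.1 [] (· ++ [(it.1.2, it.2)]))
      (PySem.Dict.empty : PySem.Dict Int (List (Int × Int)))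
    = (pc.items.map (fun it => (it.1.1, (it.1.2, it.2)))).foldl
      (fun d (p : Int × (Int × Int)) => d.modify p.1 [] (· ++ [p.2])) PySem.Dict.empty := by
    rw [List.foldl_map]
  rw [h1, PySem.Dict.getD_foldl_modify_append]
  simp [List.filter_map, List.map_map, Function.comp_def]

-- the sorting pass: inserting a function of each key's own value, over a Nodup key list
lemma pv_sortpass (ks : List Int) (hnd : ks.Nodup) :
    ∀ (d : PySem.Dict Int (List (Int × Int))) (r : Int),
      (ks.foldl (fun d k =>
        d.insert k (PySem.List.sorted (d.getD k []) (fun p => (toLex p : Int ×ₗ Int)))) d).getD r []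
      = if r ∈ ks then PySem.List.sorted (d.getD r []) (fun p => (toLex p : Int ×ₗ Int))
        else d.getD r [] := by
  induction ks with
  | nil => intro d r; simp
  | cons k ks ih =>
    intro d r
    have hk : k ∉ ks := (List.nodup_cons.mp hnd).1
    simp only [List.foldl_cons]
    rw [ih (List.nodup_cons.mp hnd).2]
    by_cases hrk : r = k
    · subst hrk
      simp [hk, PySem.Dict.getD_insert_self]
    · rw [PySem.Dict.getD_insert, if_neg hrk]
      simp [List.mem_cons, hrk]

-- keys of the grouped dict are unique
lemma pv_rows0_keys_nodup (pc : PySem.Dict (Int × Int) Int) :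
    (pc.items.foldl
      (fun d (it : (Int × Int) × Int) => d.modify it.1.1 [] (· ++ [(it.1.2, it.2)]))
      (PySem.Dict.empty : PySem.Dict Int (List (Int × Int)))).keys.Nodup :=
  PySem.Dict.nodup_keys_foldl_modify_key pc.items (fun it => it.1.1) []
    (fun _ it => (· ++ [(it.1.2, it.2)])) PySem.Dict.empty PySem.Dict.nodup_keys_empty

-- after the sorting pass, every lookup (present or not) is the sorted row
lemma pv_rows_getD (pc : PySem.Dict (Int × Int) Int) (nr : Int) :
    ((pc.items.foldl
        (fun d (it : (Int × Int) × Int) => d.modify it.1.1 [] (· ++ [(it.1.2, it.2)]))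
        (PySem.Dict.empty : PySem.Dict Int (List (Int × Int)))).keys.foldl
        (fun d r => d.insert r (PySem.List.sorted (d.getD r []) (fun p => (toLex p : Int ×ₗ Int))))
        (pc.items.foldl
          (fun d (it : (Int × Int) × Int) => d.modify it.1.1 [] (· ++ [(it.1.2, it.2)]))
          (PySem.Dict.empty : PySem.Dict Int (List (Int × Int))))).getD nr []
    = pvRow pc nr := by
  rw [pv_sortpass _ (pv_rows0_keys_nodup pc) _ nr]
  by_cases h : nr ∈ (pc.items.foldl
      (fun d (it : (Int × Int) × Int) => d.modify it.1.1 [] (· ++ [(it.1.2, it.2)]))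
      (PySem.Dict.empty : PySem.Dict Int (List (Int × Int)))).keys
  · rw [if_pos h, pv_rows0_getD]; rfl
  · rw [if_neg h]
    have hc : (pc.items.foldl
        (fun d (it : (Int × Int) × Int) => d.modify it.1.1 [] (· ++ [(it.1.2, it.2)]))
        (PySem.Dict.empty : PySem.Dict Int (List (Int × Int)))).contains nr = false := by
      rw [PySem.Dict.contains_eq_decide_mem_keys]; simpa using h
    rw [PySem.Dict.getD_of_not_contains _ _ hc]
    have : (pc.items.filter (fun it => it.1.1 == nr)).map
        (fun it => ((it.1.2 : Int), (it.2 : Int))) = [] := by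
      have h0 := pv_rows0_getD pc nr
      rw [PySem.Dict.getD_of_not_contains _ _ hc] at h0
      exact h0.symm
    unfold pvRow
    rw [this]
    exact ((PySem.List.sorted_eq_nil_iff _ _ _).mpr rfl).symm

-- ===== VERDICT (by name: the statement is the Claim_ definition above) =====
theorem find_jumps_spec : Claim_equal_find_jumps := by
  intro path dist _
  show find_jumps path dist = find_jumps_alt path dist
  simp only [find_jumps, find_jumps_alt]
  set pc := (PySem.List.enumerate path 0).foldl
    (fun d (ip : Int × (Int × Int)) => d.insert ip.2 ip.1) PySem.Dict.empty with hpc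
  have hk : pc.keys.Nodup := pv_pcost_nodup path
  have hv : ∀ p ∈ pc.items, 0 ≤ p.2 := pv_pcost_nonneg path
  have hrows : ∀ nr : Int,
      ((pc.items.foldl
          (fun d (it : (Int × Int) × Int) => d.modify it.1.1 [] (· ++ [(it.1.2, it.2)]))
          (PySem.Dict.empty : PySem.Dict Int (List (Int × Int)))).keys.foldl
        (fun d r => d.insert r (PySem.List.sorted (d.getD r []) (fun p => (toLex p : Int ×ₗ Int))))
        (pc.items.foldl
          (fun d (it : (Int × Int) × Int) => d.modify it.1.1 [] (· ++ [(it.1.2, it.2)]))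
          (PySem.Dict.empty : PySem.Dict Int (List (Int × Int))))).getD nr []
      = pvRow pc nr := fun nr => pv_rows_getD pc nr
  congr 1
  have hA : pc.items.foldl (fun jumps (it : (Int × Int) × Int) =>
      (PySem.List.pyRange (-dist) (dist + 1) 1).foldl (fun jumps dr =>
        (PySem.List.pyRange (-(dist - |dr|)) ((dist - |dr|) + 1) 1).foldl (fun jumps dc =>
          if pc.getD (it.1.1 + dr, it.1.2 + dc) 0 - (|dr| + |dc|) ≤ it.2 then jumps
          else
            if pc.getD (it.1.1 + dr, it.1.2 + dc) 0 - it.2 - (|dr| + |dc|) > 0 then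
              jumps.insert ((it.1.1, it.1.2), it.1.1 + dr, it.1.2 + dc)
                (pc.getD (it.1.1 + dr, it.1.2 + dc) 0 - it.2 - (|dr| + |dc|))
            else jumps)
          jumps) jumps) PySem.Dict.empty
      = pc.items.foldl (pvStepA pc dist) PySem.Dict.empty := by
    refine PySem.List.foldl_congr_mem _ _ _ _ ?_
    intro acc it _
    exact pvBodyA pc dist acc it
  have hstep : ∀ (it : (Int × Int) × Int), 0 ≤ it.2 →
      (pvBand pc it.1 dist).filter (pvW pc dist it) =
        (pvDia it.1 dist).filter (pvW pc dist it) :=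
    fun it hst => (pvCore pc dist it hk hst).symm
  have hfin := pvOuter pc dist (fun it => pvBand pc it.1 dist) hstep pc.items
    PySem.Dict.empty hv hk (by simp [PySem.Dict.empty])
  congr 1
  calc _ = pc.items.foldl (pvStepA pc dist) PySem.Dict.empty := hA
    _ = pc.items.foldl (fun j it => pvStep pc dist (pvBand pc it.1 dist) j it)
        PySem.Dict.empty := hfin
    _ = _ := by
        refine (PySem.List.foldl_congr_mem _ _ _ _ ?_).symm
        intro acc it _
        exact pvBodyB pc dist hk _ hrows acc it
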